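-- pv_equiv track=rewrite | github.com/chenyaqiao0505/Code111 | DIO项目(非正式)/DIO项目源码/DIO项目源码/DI/UdpGUI.py | finalhandle1
-- ===== SOURCE A (Python) =====
-- def finalhandle1(list):
--     handlelist1 = []
--     handlelist2 = []
--     for i in range(0, len(list), 2):
--         handlelist1.append(list[i])
--
--     for j in range(1, len(list), 2):
--         handlelist2.append(list[j])
--
--     finallylist = []
--     finallylist1 = []
--     for j, k in zip(handlelist1, handlelist2):
--         finallylist.append(str(j) + ', ' + str(k))
--     finallylist1.append(finallylist)
--     return finallylist1
-- ===== SOURCE B (Python) =====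
-- def finalhandle1(list):
--     result = []
--     i = 0
--     while i + 1 < len(list):
--         result.append(str(list[i]) + ', ' + str(list[i + 1]))
--         i += 2
--     return [result]
-- ===== Notes on version B (the rewrite author's own statement) =====
-- stated objective: simpler
-- what changed: Instead of building two index-filtered lists (even and odd positions) and zipping them, B makes one direct pass over adjacent pairs, formatting list[i] and list[i+1] while stepping i by 2.
import Mathlib
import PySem

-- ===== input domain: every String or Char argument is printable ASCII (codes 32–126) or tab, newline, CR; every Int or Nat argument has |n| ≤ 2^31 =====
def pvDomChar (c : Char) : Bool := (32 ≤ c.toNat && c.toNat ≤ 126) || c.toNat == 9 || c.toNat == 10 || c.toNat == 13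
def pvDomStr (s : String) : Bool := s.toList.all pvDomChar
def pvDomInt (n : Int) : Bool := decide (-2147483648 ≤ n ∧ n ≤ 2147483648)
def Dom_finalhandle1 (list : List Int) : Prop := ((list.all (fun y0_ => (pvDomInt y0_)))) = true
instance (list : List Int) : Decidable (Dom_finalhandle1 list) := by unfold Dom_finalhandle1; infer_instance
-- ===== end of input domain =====

-- B replaces A's two index-filtered lists + zip with one direct pass over adjacent pairs (objective: simpler).

-- ===== PORT A =====
def finalhandle1 (list : List Int) : List (List String) :=
  let handlelist1 := (PySem.List.pyRange 0 (PySem.List.len list) 2).foldl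
    (fun acc i => acc ++ [PySem.List.pyGetD list i 0]) []
  let handlelist2 := (PySem.List.pyRange 1 (PySem.List.len list) 2).foldl
    (fun acc j => acc ++ [PySem.List.pyGetD list j 0]) []
  let finallylist := (handlelist1.zip handlelist2).foldl
    (fun acc jk => acc ++ [PySem.Int.toStr jk.1 ++ ", " ++ PySem.Int.toStr jk.2]) []
  [finallylist]

-- ===== PORT B =====
-- transcription of Source B's while loop: each iteration consumes two elements and emits one pair
def finalhandle1AltAux : List Int → List String
  | a :: b :: rest => (PySem.Int.toStr a ++ ", " ++ PySem.Int.toStr b) :: finalhandle1AltAux rest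
  | _ => []

def finalhandle1_alt (list : List Int) : List (List String) :=
  [finalhandle1AltAux list]

-- ===== PRECONDITION & SPEC =====
def Spec_finalhandle1 (list : List Int) (out : List (List String)) : Prop := out = finalhandle1_alt list
instance (list : List Int) (out : List (List String)) : Decidable (Spec_finalhandle1 list out) := by unfold Spec_finalhandle1; infer_instance

-- ===== CLAIM (what is proved, stated in full; the proofs are below) =====
def Claim_equal_finalhandle1 : Prop := ∀ (list : List Int), Dom_finalhandle1 list → Spec_finalhandle1 list (finalhandle1 list)

-- ===== LEMMAS AND PROOFS =====

-- a foldl that appends singletons is a map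
theorem foldl_append_singleton {α β : Type} (f : α → β) :
    ∀ (r : List α) (init : List β),
      r.foldl (fun acc i => acc ++ [f i]) init = init ++ r.map f := by
  intro r
  induction r with
  | nil => intro init; simp
  | cons x xs ih => intro init; simp [List.foldl_cons, ih]

theorem pyRange2_nil (a b : Int) (h : b ≤ a) : PySem.List.pyRange a b 2 = [] := by
  rw [PySem.List.pyRange_of_pos a b (by norm_num)]
  rw [if_neg (by omega)]
  simp

theorem pyRange2_cons (a b : Int) (h : a < b) :
    PySem.List.pyRange a b 2 = a :: PySem.List.pyRange (a + 2) b 2 := by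
  rw [PySem.List.pyRange_of_pos a b (by norm_num),
      PySem.List.pyRange_of_pos (a + 2) b (by norm_num)]
  by_cases h2 : a + 2 < b
  · rw [if_pos h, if_pos h2]
    have hm : ((b - a + 2 - 1) / 2).toNat = ((b - (a + 2) + 2 - 1) / 2).toNat + 1 := by omega
    rw [hm, List.range_succ_eq_map]
    simp only [List.map_cons, List.map_map]
    congr 1
    · push_cast; ring
    · apply List.map_congr_left
      intro k _
      simp only [Function.comp, Nat.succ_eq_add_one]
      push_cast
      ring
  · rw [if_pos h, if_neg h2]
    have hm : ((b - a + 2 - 1) / 2).toNat = 1 := by omega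
    rw [hm]
    simp

theorem map_pyRange2_shift (x y : Int) (r : List Int) (a b : Int) (ha : 0 ≤ a) :
    (PySem.List.pyRange (a + 2) b 2).map (fun i => PySem.List.pyGetD (x :: y :: r) i 0)
      = (PySem.List.pyRange a (b - 2) 2).map (fun i => PySem.List.pyGetD r i 0) := by
  rw [PySem.List.pyRange_of_pos (a + 2) b (by norm_num),
      PySem.List.pyRange_of_pos a (b - 2) (by norm_num)]
  by_cases h2 : a + 2 < b
  · rw [if_pos h2, if_pos (show a < b - 2 by omega)]
    have hm : ((b - (a + 2) + 2 - 1) / 2) = ((b - 2 - a + 2 - 1) / 2) := by omega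
    rw [hm]
    simp only [List.map_map]
    apply List.map_congr_left
    intro k _
    simp only [Function.comp]
    rw [PySem.List.pyGetD_of_nonneg _ _ (by positivity),
        PySem.List.pyGetD_of_nonneg _ _ (by positivity)]
    have ht : (a + 2 + 2 * (k : Int)).toNat = (a + 2 * (k : Int)).toNat + 2 := by omega
    rw [ht]
    simp
  · rw [if_neg h2, if_neg (show ¬ a < b - 2 by omega)]
    simp

def evensA (l : List Int) : List Int :=
  (PySem.List.pyRange 0 (l.length : Int) 2).map (fun i => PySem.List.pyGetD l i 0)

def oddsA (l : List Int) : List Int :=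
  (PySem.List.pyRange 1 (l.length : Int) 2).map (fun i => PySem.List.pyGetD l i 0)

theorem evensA_cons2 (a b : Int) (r : List Int) :
    evensA (a :: b :: r) = a :: evensA r := by
  unfold evensA
  have hn : ((a :: b :: r).length : Int) = (r.length : Int) + 2 := by simp; omega
  rw [hn, pyRange2_cons 0 _ (by omega), List.map_cons]
  have h0 : PySem.List.pyGetD (a :: b :: r) 0 0 = a := by
    rw [show (0 : Int) = ((0 : Nat) : Int) by rfl, PySem.List.pyGetD_natCast]; rfl
  rw [h0]
  have := map_pyRange2_shift a b r 0 ((r.length : Int) + 2) (by omega)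
  simpa using this

theorem oddsA_cons2 (a b : Int) (r : List Int) :
    oddsA (a :: b :: r) = b :: oddsA r := by
  unfold oddsA
  have hn : ((a :: b :: r).length : Int) = (r.length : Int) + 2 := by simp; omega
  rw [hn, pyRange2_cons 1 _ (by omega), List.map_cons]
  have h1 : PySem.List.pyGetD (a :: b :: r) 1 0 = b := by
    rw [show (1 : Int) = ((1 : Nat) : Int) by rfl, PySem.List.pyGetD_natCast]; rfl
  rw [h1]
  have := map_pyRange2_shift a b r 1 ((r.length : Int) + 2) (by omega)
  simpa using this

theorem oddsA_nil : oddsA [] = [] := by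
  unfold oddsA
  rw [pyRange2_nil 1 _ (by simp)]
  rfl

theorem oddsA_single (a : Int) : oddsA [a] = [] := by
  unfold oddsA
  rw [pyRange2_nil 1 _ (by simp)]
  rfl

theorem zip_evens_odds :
    ∀ (l : List Int),
      ((evensA l).zip (oddsA l)).map
          (fun jk => PySem.Int.toStr jk.1 ++ ", " ++ PySem.Int.toStr jk.2)
        = finalhandle1AltAux l
  | [] => by rw [oddsA_nil]; simp [finalhandle1AltAux]
  | [a] => by rw [oddsA_single]; simp [finalhandle1AltAux]
  | a :: b :: r => by
      rw [evensA_cons2, oddsA_cons2, List.zip_cons_cons, List.map_cons,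
          zip_evens_odds r]
      rfl

-- ===== VERDICT (by name: the statement is the Claim_ definition above) =====
theorem finalhandle1_spec : Claim_equal_finalhandle1 := by
  intro list _
  unfold Spec_finalhandle1 finalhandle1 finalhandle1_alt
  simp only [foldl_append_singleton, List.nil_append, PySem.List.len]
  rw [show (PySem.List.pyRange 0 (list.length : Int) 2).map (fun i => PySem.List.pyGetD list i 0) = evensA list from rfl,
      show (PySem.List.pyRange 1 (list.length : Int) 2).map (fun i => PySem.List.pyGetD list i 0) = oddsA list from rfl,
      zip_evens_odds list]
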